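-- pv_equiv track=rewrite | github.com/sharford5/SFA_Python | src/transformation/BOSSVS.py | createWord
-- ===== SOURCE A (Python) =====
-- def createWord(numbers, maxF, bits):
--     shortsPerLong = int(round(60 / bits))
--     to = min([len(numbers), maxF])
--
--     b = 0
--     s = 0
--     shiftOffset = 1
--     for i in range(s, (min(to, shortsPerLong + s))):
--         shift = 1
--         for j in range(bits):
--             if (numbers[i] & shift) != 0:
--                 b |= shiftOffset
--             shiftOffset <<= 1
--             shift <<= 1
--
--     limit = 2147483647
--     total = 2147483647 + 2147483648
--     while b > limit:
--         b = b - total - 1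
--     return b
-- ===== SOURCE B (Python) =====
-- def createWord(numbers, maxF, bits):
--     # pack each number's low `bits` bits as one masked chunk, then signed 32-bit wrap via modulo
--     if bits <= 0:
--         return 0
--     shortsPerLong = round(60 / bits)
--     n = min(len(numbers), maxF, shortsPerLong)
--     mask = (1 << bits) - 1
--     b = 0
--     for i in range(n):
--         b += (numbers[i] & mask) << (i * bits)
--     return ((b + 0x80000000) % 0x100000000) - 0x80000000
-- ===== Notes on version B (the rewrite author's own statement) =====
-- stated objective: simpler
-- what changed: replaces A's nested per-bit scan (inner loop over every bit of every number with a running shiftOffset) by a single pass that masks each number's low bits and adds the whole chunk shifted into place, and replaces A's repeated-subtraction signed-32-bit wrap loop by one modulo expression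
import Mathlib
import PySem

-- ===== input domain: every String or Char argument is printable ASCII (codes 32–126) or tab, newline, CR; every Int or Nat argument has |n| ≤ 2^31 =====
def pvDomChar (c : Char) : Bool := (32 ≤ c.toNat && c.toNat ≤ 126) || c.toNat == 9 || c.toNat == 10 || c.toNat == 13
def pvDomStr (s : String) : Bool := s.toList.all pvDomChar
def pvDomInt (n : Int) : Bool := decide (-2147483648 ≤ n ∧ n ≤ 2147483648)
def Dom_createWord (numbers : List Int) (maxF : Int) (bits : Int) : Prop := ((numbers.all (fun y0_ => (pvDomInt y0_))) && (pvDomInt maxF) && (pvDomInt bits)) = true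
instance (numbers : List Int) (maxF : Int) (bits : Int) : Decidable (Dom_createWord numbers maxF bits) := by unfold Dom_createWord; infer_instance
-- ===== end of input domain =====

-- B replaces A's per-bit nested scan and repeated-subtraction 32-bit wrap by one masked-chunk
-- pass and a single modulo (simpler); return-value equivalence, no arguments are mutated.

-- ===== PORT A =====
-- shared helper: exact integer form of Python's round(60 / bits) (banker's rounding of the
-- rational 60/bits; the float division is exact at every half-way point of this expression)
def pyRound60 (d : Int) : Int :=
  let f := PySem.Int.floordiv 60 d
  let r := 60 - f * d
  if d.natAbs < 2 * r.natAbs then f + 1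
  else if 2 * r.natAbs < d.natAbs then f
  else if f % 2 = 0 then f else f + 1

-- the final 'while b > limit: b = b - total - 1' loop of A
def wrapLoop (b : Int) : Int :=
  if 2147483647 < b then wrapLoop (b - (2147483647 + 2147483648) - 1) else b
termination_by b.toNat
decreasing_by omega

def createWord (numbers : List Int) (maxF : Int) (bits : Int) : Int :=
  let shortsPerLong := pyRound60 bits
  let tov := min (numbers.length : Int) maxF
  let s : Int := 0
  let st := (PySem.List.pyRange s (min tov (shortsPerLong + s)) 1).foldl
    (fun (st : Int × Int) i =>
      let inner := (PySem.List.pyRange 0 bits 1).foldl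
        (fun (st2 : Int × Int × Int) _j =>
          (if PySem.Int.band (PySem.List.pyGetD numbers i 0) st2.2.2 ≠ 0
             then PySem.Int.bor st2.1 st2.2.1 else st2.1,
           st2.2.1 <<< (1:Nat), st2.2.2 <<< (1:Nat)))
        (st.1, st.2, 1)
      (inner.1, inner.2.1))
    (0, 1)
  wrapLoop st.1

-- ===== PORT B =====
def createWord_alt (numbers : List Int) (maxF : Int) (bits : Int) : Int :=
  if bits ≤ 0 then 0
  else
    let shortsPerLong := pyRound60 bits
    let n := min (min (numbers.length : Int) maxF) shortsPerLong
    let mask := ((1 : Int) <<< bits.toNat) - 1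
    let b := (PySem.List.pyRange 0 n 1).foldl
      (fun b i => b + (PySem.Int.band (PySem.List.pyGetD numbers i 0) mask) <<< (i * bits).toNat)
      0
    PySem.Int.mod (b + 2147483648) 4294967296 - 2147483648

-- ===== PRECONDITION & SPEC =====
-- Pre_ excludes only bits = 0, where A raises ZeroDivisionError in round(60 / bits).
def Pre_createWord (numbers : List Int) (maxF : Int) (bits : Int) : Prop := bits ≠ 0
instance (numbers : List Int) (maxF : Int) (bits : Int) : Decidable (Pre_createWord numbers maxF bits) := by unfold Pre_createWord; infer_instance
def pvWitness_createWord : List Int × Int × Int := ([3, -5, 12], 3, 8)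

def Spec_createWord (numbers : List Int) (maxF : Int) (bits : Int) (out : Int) : Prop := out = createWord_alt numbers maxF bits
instance (numbers : List Int) (maxF : Int) (bits : Int) (out : Int) : Decidable (Spec_createWord numbers maxF bits out) := by unfold Spec_createWord; infer_instance

-- ===== CLAIM (what is proved, stated in full; the proofs are below) =====
def Claim_equal_createWord : Prop := ∀ (numbers : List Int) (maxF : Int) (bits : Int), Dom_createWord numbers maxF bits → Pre_createWord numbers maxF bits → Spec_createWord numbers maxF bits (createWord numbers maxF bits)

-- ===== LEMMAS AND PROOFS =====

-- range(0, n) over an Int bound, as a mapped Nat range (empty for n ≤ 0)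
lemma pyRange01 (n : Int) : PySem.List.pyRange 0 n 1 = List.map (fun (k : Nat) => (k : Int)) (List.range n.toNat) := by
  rcases n with m | m
  · simp only [Int.ofNat_eq_natCast, Int.toNat_natCast]
    exact PySem.List.pyRange_zero_natCast m
  · simp [PySem.List.pyRange]

-- (-1 - m) % p for positive p
lemma emod_neg_one_sub (m : Nat) (p : Int) (hp : 0 < p) : (-1 - (m : Int)) % p = p - 1 - (m : Int) % p := by
  have hm0 : 0 ≤ (m : Int) % p := Int.emod_nonneg _ (by omega)
  have hm1 : (m : Int) % p < p := Int.emod_lt_of_pos _ hp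
  have hrhs : (p - 1 - (m : Int) % p) % p = p - 1 - (m : Int) % p := Int.emod_eq_of_lt (by omega) (by omega)
  rw [← hrhs, Int.emod_eq_emod_iff_emod_sub_eq_zero]
  have hd : p ∣ (-1 - (m : Int) - (p - 1 - (m : Int) % p)) := by
    have h2 := Int.emod_def (m : Int) p
    exact ⟨-((m : Int) / p) - 1, by linarith⟩
  exact Int.emod_eq_zero_of_dvd hd

-- the next binary chunk of x is its low chunk plus bit m
lemma nat_chunk_step (x m : Nat) : x % 2 ^ (m + 1) = x % 2 ^ m + (x &&& 2 ^ m) := by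
  rw [Nat.and_two_pow, Nat.testBit_eq_decide_div_mod_eq, Nat.mod_pow_succ]
  by_cases h : x / 2 ^ m % 2 = 1 <;> simp [h] <;> omega

lemma int_pow_cast (m : Nat) : ((2 : Int) ^ m) = ((2 ^ m : Nat) : Int) := by push_cast; ring

-- Python's x & (1 << m) reads bit m: the difference of two mod-chunks (any sign of x)
lemma band_two_pow (a : Int) (m : Nat) : PySem.Int.band a (2 ^ m) = a % 2 ^ (m + 1) - a % 2 ^ m := by
  rw [int_pow_cast m, int_pow_cast (m + 1)]
  by_cases ha : 0 ≤ a
  · obtain ⟨x, rfl⟩ : ∃ x : Nat, a = (x : Int) := ⟨a.toNat, by omega⟩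
    rw [PySem.Int.band_natCast, ← Int.natCast_mod, ← Int.natCast_mod]
    have h := nat_chunk_step x m
    omega
  · have hb : (0 : Int) ≤ ((2 ^ m : Nat) : Int) := by positivity
    rw [show PySem.Int.band a ((2 ^ m : Nat) : Int) = ((2 ^ m : Nat) : Int) - (((-a - 1).toNat &&& 2 ^ m : Nat) : Int) by
      simp only [PySem.Int.band, if_neg ha, if_pos hb, Int.toNat_natCast]
      rw [Nat.and_comm]
      have hle : (-a - 1).toNat &&& 2 ^ m ≤ 2 ^ m := Nat.and_le_right
      omega]
    set M := (-a - 1).toNat with hMdef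
    have hM : a = -1 - (M : Int) := by omega
    rw [hM, ← int_pow_cast m, ← int_pow_cast (m + 1),
        emod_neg_one_sub M _ (by positivity), emod_neg_one_sub M _ (by positivity),
        int_pow_cast m, int_pow_cast (m + 1)]
    rw [show ((M : Int)) % ((2 ^ (m + 1) : Nat) : Int) = ((M % 2 ^ (m + 1) : Nat) : Int) from (Int.natCast_mod _ _).symm,
        show ((M : Int)) % ((2 ^ m : Nat) : Int) = ((M % 2 ^ m : Nat) : Int) from (Int.natCast_mod _ _).symm]
    have h := nat_chunk_step M m
    omega

-- Python's x & ((1 << m) - 1) is x % 2^m (any sign of x)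
lemma band_mask (a : Int) (m : Nat) : PySem.Int.band a (2 ^ m - 1) = a % 2 ^ m := by
  have e : ((2 : Int) ^ m - 1) = (((2 ^ m - 1 : Nat)) : Int) := by
    have : 1 ≤ 2 ^ m := Nat.one_le_two_pow
    push_cast [this]; ring
  rw [e, int_pow_cast m]
  by_cases ha : 0 ≤ a
  · obtain ⟨x, rfl⟩ : ∃ x : Nat, a = (x : Int) := ⟨a.toNat, by omega⟩
    rw [PySem.Int.band_natCast, ← Int.natCast_mod, Nat.and_two_pow_sub_one_eq_mod]
  · have hb : (0 : Int) ≤ ((2 ^ m - 1 : Nat) : Int) := by positivity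
    rw [show PySem.Int.band a ((2 ^ m - 1 : Nat) : Int) = ((2 ^ m - 1 : Nat) : Int) - (((-a - 1).toNat &&& (2 ^ m - 1) : Nat) : Int) by
      simp only [PySem.Int.band, if_neg ha, if_pos hb, Int.toNat_natCast]
      rw [Nat.and_comm]
      have hle : (-a - 1).toNat &&& (2 ^ m - 1) ≤ 2 ^ m - 1 := Nat.and_le_right
      omega]
    set M := (-a - 1).toNat with hMdef
    have hM : a = -1 - (M : Int) := by omega
    rw [hM, ← int_pow_cast m, emod_neg_one_sub M _ (by positivity), int_pow_cast m]
    rw [show ((M : Int)) % ((2 ^ m : Nat) : Int) = ((M % 2 ^ m : Nat) : Int) from (Int.natCast_mod _ _).symm,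
        Nat.and_two_pow_sub_one_eq_mod]
    have h1 : 1 ≤ 2 ^ m := Nat.one_le_two_pow
    have h2 : M % 2 ^ m < 2 ^ m := Nat.mod_lt _ (by omega)
    omega

-- setting a bit above everything already set is addition
lemma bor_two_pow (b : Int) (k : Nat) (h0 : 0 ≤ b) (h : b < 2 ^ k) : PySem.Int.bor b (2 ^ k) = b + 2 ^ k := by
  rw [int_pow_cast k]
  obtain ⟨x, rfl⟩ : ∃ x : Nat, b = (x : Int) := ⟨b.toNat, by omega⟩
  rw [PySem.Int.bor_natCast]
  have hx : x < 2 ^ k := by exact_mod_cast lt_of_lt_of_eq h (int_pow_cast k)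
  have h1 := Nat.two_pow_add_eq_or_of_lt hx 1
  simp only [mul_one] at h1
  rw [Nat.lor_comm, ← h1]
  push_cast; ring

-- A's subtraction loop is one centered modulo, for any b ≥ -2^31
lemma wrapLoop_eq (b : Int) (h : -2147483648 ≤ b) : wrapLoop b = (b + 2147483648) % 4294967296 - 2147483648 := by
  induction b using wrapLoop.induct with
  | case1 b hlt ih =>
    rw [wrapLoop, if_pos hlt, ih (by omega)]
    omega
  | case2 b hlt =>
    rw [wrapLoop, if_neg hlt]
    omega

-- the packed value: sum of the low-B-bit chunks of the first n numbers
def chunkSum (numbers : List Int) (B : Nat) : Nat → Int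
  | 0 => 0
  | n + 1 => chunkSum numbers B n + (numbers.getD n 0 % 2 ^ B) * 2 ^ (n * B)

lemma chunkSum_nonneg (numbers : List Int) (B : Nat) (n : Nat) : 0 ≤ chunkSum numbers B n := by
  induction n with
  | zero => simp [chunkSum]
  | succ n ih =>
    have h1 : 0 ≤ numbers.getD n 0 % 2 ^ B := Int.emod_nonneg _ (by positivity)
    have h2 : (0 : Int) < 2 ^ (n * B) := by positivity
    simp only [chunkSum]
    nlinarith

lemma chunkSum_lt (numbers : List Int) (B : Nat) (n : Nat) : chunkSum numbers B n < 2 ^ (n * B) := by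
  induction n with
  | zero => simp [chunkSum]
  | succ n ih =>
    have h1 : numbers.getD n 0 % 2 ^ B < 2 ^ B := Int.emod_lt_of_pos _ (by positivity)
    have h2 : (0 : Int) < 2 ^ (n * B) := by positivity
    simp only [chunkSum]
    calc chunkSum numbers B n + (numbers.getD n 0 % 2 ^ B) * 2 ^ (n * B)
        < 2 ^ (n * B) + (2 ^ B - 1) * 2 ^ (n * B) := by
          have h3 := mul_le_mul_of_nonneg_right (show numbers.getD n 0 % 2 ^ B ≤ 2 ^ B - 1 by omega) (le_of_lt h2)
          omega
      _ = 2 ^ ((n + 1) * B) := by rw [show (n + 1) * B = n * B + B by ring, pow_add]; ring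

-- A's inner bit loop, one outer iteration: packs x's low m bits at offset `off`
lemma inner_eq (x b0 : Int) (off : Nat) (h0 : 0 ≤ b0) (hb : b0 < 2 ^ off) (m : Nat) :
    (List.range m).foldl
      (fun (st2 : Int × Int × Int) (_j : Nat) =>
        (if PySem.Int.band x st2.2.2 ≠ 0 then PySem.Int.bor st2.1 st2.2.1 else st2.1,
         st2.2.1 * 2 ^ (1:Nat), st2.2.2 * 2 ^ (1:Nat)))
      (b0, 2 ^ off, 1)
    = (b0 + (x % 2 ^ m) * 2 ^ off, 2 ^ (off + m), 2 ^ m) := by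
  induction m with
  | zero => simp
  | succ m ih =>
    rw [List.range_succ, List.foldl_append, ih, List.foldl_cons, List.foldl_nil]
    have hso : (2 : Int) ^ (off + m) * 2 ^ (1:Nat) = 2 ^ (off + (m + 1)) := by ring
    have hsh : (2 : Int) ^ m * 2 ^ (1:Nat) = 2 ^ (m + 1) := by ring
    have hv0 : 0 ≤ x % 2 ^ m := Int.emod_nonneg _ (by positivity)
    have hv1 : x % 2 ^ m < 2 ^ m := Int.emod_lt_of_pos _ (by positivity)
    have hu0 : 0 ≤ x % 2 ^ (m + 1) := Int.emod_nonneg _ (by positivity)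
    have hu1 : x % 2 ^ (m + 1) < 2 ^ (m + 1) := Int.emod_lt_of_pos _ (by positivity)
    have hmm : x % 2 ^ (m + 1) % 2 ^ m = x % 2 ^ m := Int.emod_emod_of_dvd _ ⟨2, by ring⟩
    have hq : x % 2 ^ (m + 1) = x % 2 ^ m ∨ x % 2 ^ (m + 1) = x % 2 ^ m + 2 ^ m := by
      set u := x % 2 ^ (m + 1) with hu
      have hdef := Int.emod_def u (2 ^ m)
      have hq0 : 0 ≤ u / 2 ^ m := Int.ediv_nonneg hu0 (by positivity)
      have hq1 : u / 2 ^ m < 2 := by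
        rw [Int.ediv_lt_iff_lt_mul (by positivity)]
        calc u < 2 ^ (m + 1) := hu1
        _ = 2 * 2 ^ m := by ring
      interval_cases h : u / 2 ^ m <;> rw [hmm] at hdef <;> omega
    rw [band_two_pow]
    simp only
    rcases hq with hq | hq
    · rw [hq]
      simp only [sub_self, ne_eq, not_true_eq_false, if_false, hso, hsh]
    · rw [hq]
      have h2m : (0 : Int) < 2 ^ m := by positivity
      have hne : x % 2 ^ m + 2 ^ m - x % 2 ^ m ≠ 0 := by omega
      simp only [hne, ne_eq, not_false_eq_true, if_true, hso, hsh]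
      have hlt : b0 + (x % 2 ^ m) * 2 ^ off < 2 ^ (off + m) := by
        have h2 : (x % 2 ^ m) * 2 ^ off ≤ (2 ^ m - 1) * 2 ^ off := by
          apply mul_le_mul_of_nonneg_right (by omega) (by positivity)
        calc b0 + (x % 2 ^ m) * 2 ^ off ≤ b0 + (2 ^ m - 1) * 2 ^ off := by omega
        _ < 2 ^ off + (2 ^ m - 1) * 2 ^ off := by omega
        _ = 2 ^ (off + m) := by rw [pow_add]; ring
      rw [bor_two_pow _ (off + m) (by positivity) hlt]
      simp only [Prod.mk.injEq, and_true]
      rw [pow_add]; ring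

-- A's outer loop over the first n numbers
lemma outer_eq (numbers : List Int) (B : Nat) (n : Nat) :
    (List.range n).foldl
      (fun (st : Int × Int) (i : Nat) =>
        (((List.range B).foldl
          (fun (st2 : Int × Int × Int) (_j : Nat) =>
            (if PySem.Int.band (numbers.getD i 0) st2.2.2 ≠ 0
               then PySem.Int.bor st2.1 st2.2.1 else st2.1,
             st2.2.1 * 2 ^ (1:Nat), st2.2.2 * 2 ^ (1:Nat)))
          (st.1, st.2, 1)).1,
         ((List.range B).foldl
          (fun (st2 : Int × Int × Int) (_j : Nat) =>
            (if PySem.Int.band (numbers.getD i 0) st2.2.2 ≠ 0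
               then PySem.Int.bor st2.1 st2.2.1 else st2.1,
             st2.2.1 * 2 ^ (1:Nat), st2.2.2 * 2 ^ (1:Nat)))
          (st.1, st.2, 1)).2.1))
      (0, 1)
    = (chunkSum numbers B n, 2 ^ (n * B)) := by
  induction n with
  | zero => simp [chunkSum]
  | succ n ih =>
    rw [List.range_succ, List.foldl_append, ih, List.foldl_cons, List.foldl_nil]
    simp only
    rw [inner_eq (numbers.getD n 0) _ (n * B) (chunkSum_nonneg numbers B n) (chunkSum_lt numbers B n) B]
    rw [show (n + 1) * B = n * B + B by ring]
    simp [chunkSum]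

-- B's single pass computes the same sum
lemma alt_sum (numbers : List Int) (B : Nat) (n : Nat) :
    (List.range n).foldl
      (fun (b : Int) (i : Nat) =>
        b + PySem.Int.band (numbers.getD i 0) (2 ^ B - 1) * 2 ^ (i * B))
      0
    = chunkSum numbers B n := by
  induction n with
  | zero => simp [chunkSum]
  | succ n ih =>
    rw [List.range_succ, List.foldl_append, ih, List.foldl_cons, List.foldl_nil]
    simp only [chunkSum]
    rw [band_mask]

-- A's outer step is the identity when the inner bit list is empty (bits < 0)
lemma foldl_pair_id (l : List Int) (init : Int × Int) :
    l.foldl (fun (st : Int × Int) (_ : Int) => (st.1, st.2)) init = init := by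
  induction l generalizing init with
  | nil => rfl
  | cons a l ih => simpa using ih init

-- ===== VERDICT (by name: the statement is the Claim_ definition above) =====
theorem createWord_spec : Claim_equal_createWord := by
  intro numbers maxF bits hdom hpre
  unfold Spec_createWord
  by_cases hbits : bits ≤ 0
  · -- bits < 0: the inner bit range is empty, both sides return 0
    simp only [createWord, createWord_alt, if_pos hbits]
    rw [pyRange01 bits, Int.toNat_of_nonpos hbits, List.range_zero, List.map_nil]
    simp only [List.foldl_nil]
    rw [foldl_pair_id]
    rw [wrapLoop]
    norm_num
  · -- bits > 0
    rw [not_le] at hbits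
    obtain ⟨B, rfl⟩ : ∃ B : Nat, bits = (B : Int) := ⟨bits.toNat, by omega⟩
    simp only [createWord, createWord_alt, if_neg (by omega : ¬ (B : Int) ≤ 0), add_zero]
    rw [pyRange01 (min (min ((numbers.length : Int)) maxF) (pyRound60 (B : Int))), pyRange01 (B : Int), Int.toNat_natCast]
    simp only [List.foldl_map, PySem.List.pyGetD_natCast, ← Nat.cast_mul, Int.toNat_natCast,
      Int.shiftLeft_eq, one_mul]
    rw [outer_eq numbers B, alt_sum numbers B]
    rw [PySem.Int.mod_eq_emod_of_pos (by norm_num)]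
    exact wrapLoop_eq _ (by linarith [chunkSum_nonneg numbers B (min (min (numbers.length : Int) maxF) (pyRound60 B)).toNat])
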